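-- pv_equiv track=rewrite | github.com/Flower2103/Lenguajes_Automatas_I | p1.5/main.py | token_string
-- ===== SOURCE A (Python) =====
-- def token_string(array):
--     tokens= []
--     grupo_string = False
--
--     for token, _ in array:
--         if (token >= 65 and token <= 90) or (token >= 97 and token <= 122):
--             if not grupo_string:
--                 tokens.append(555)
--                 grupo_string = True
--         else:
--             grupo_string = False
--             tokens.append(token)
--     return tokens
-- ===== SOURCE B (Python) =====
-- def token_string(array):
--     def is_letter(c):
--         return 65 <= c <= 90 or 97 <= c <= 122
--     out = []
--     i, n = 0, len(array)
--     while i < n: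
--         if is_letter(array[i][0]):
--             out.append(555)
--             while i < n and is_letter(array[i][0]):
--                 i += 1
--         else:
--             out.append(array[i][0])
--             i += 1
--     return out
-- ===== Notes on version B (the rewrite author's own statement) =====
-- stated objective: alternative
-- what changed: Replaces A's boolean grupo_string flag state machine with a run-based two-pointer scan: on a letter token it emits one 555 and an inner loop skips the whole maximal letter run, so no cross-iteration flag state is carried.
import Mathlib
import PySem

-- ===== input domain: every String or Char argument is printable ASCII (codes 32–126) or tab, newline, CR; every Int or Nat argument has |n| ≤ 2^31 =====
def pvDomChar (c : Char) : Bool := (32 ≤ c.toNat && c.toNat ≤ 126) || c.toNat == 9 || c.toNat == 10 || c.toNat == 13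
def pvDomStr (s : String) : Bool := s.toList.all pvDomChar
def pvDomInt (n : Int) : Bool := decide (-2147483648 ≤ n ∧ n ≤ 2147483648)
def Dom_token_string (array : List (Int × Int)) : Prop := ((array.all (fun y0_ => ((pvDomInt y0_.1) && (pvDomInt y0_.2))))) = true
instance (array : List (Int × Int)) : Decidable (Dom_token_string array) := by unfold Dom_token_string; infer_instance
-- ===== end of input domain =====

-- B replaces A's boolean-flag state machine by a run-skipping two-pointer scan (alternative decomposition, same cost).


-- ===== PORT A =====
-- literal transliteration of A: fold carrying (tokens, grupo_string)
def token_string (array : List (Int × Int)) : List Int :=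
  (array.foldl (fun (st : List Int × Bool) p =>
      if (p.1 ≥ 65 && p.1 ≤ 90) || (p.1 ≥ 97 && p.1 ≤ 122) then
        if !st.2 then (st.1 ++ [555], true) else st
      else
        (st.1 ++ [p.1], false))
    ([], false)).1

-- ===== PORT B =====
def pvIsLetter (c : Int) : Bool := (65 ≤ c && c ≤ 90) || (97 ≤ c && c ≤ 122)

-- transliteration of B's while loop: on a letter emit 555 and skip the whole run
def token_string_alt : List (Int × Int) → List Int
  | [] => []
  | p :: rest =>
    if pvIsLetter p.1 then
      555 :: token_string_alt (rest.dropWhile (fun q => pvIsLetter q.1))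
    else
      p.1 :: token_string_alt rest
  termination_by l => l.length
  decreasing_by
  · exact Nat.lt_succ_of_le (List.length_dropWhile_le _ _)
  · simp

-- ===== PRECONDITION & SPEC =====
def Spec_token_string (array : List (Int × Int)) (out : List Int) : Prop := out = token_string_alt array
instance (array : List (Int × Int)) (out : List Int) : Decidable (Spec_token_string array out) := by unfold Spec_token_string; infer_instance

-- ===== CLAIM (what is proved, stated in full; the proofs are below) =====
def Claim_equal_token_string : Prop := ∀ (array : List (Int × Int)), Dom_token_string array → Spec_token_string array (token_string array)

-- ===== LEMMAS AND PROOFS =====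
lemma token_string_loop (l : List (Int × Int)) : ∀ acc : List Int,
    (l.foldl (fun (st : List Int × Bool) p =>
      if (p.1 ≥ 65 && p.1 ≤ 90) || (p.1 ≥ 97 && p.1 ≤ 122) then
        if !st.2 then (st.1 ++ [555], true) else st
      else
        (st.1 ++ [p.1], false)) (acc, false)).1 = acc ++ token_string_alt l
    ∧
    (l.foldl (fun (st : List Int × Bool) p =>
      if (p.1 ≥ 65 && p.1 ≤ 90) || (p.1 ≥ 97 && p.1 ≤ 122) then
        if !st.2 then (st.1 ++ [555], true) else st
      else
        (st.1 ++ [p.1], false)) (acc, true)).1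
      = acc ++ token_string_alt (l.dropWhile (fun q => pvIsLetter q.1)) := by
  induction l with
  | nil => intro acc; simp [token_string_alt]
  | cons p rest ih =>
    intro acc
    by_cases h : pvIsLetter p.1 = true
    · have h' : ((p.1 ≥ 65 && p.1 ≤ 90) || (p.1 ≥ 97 && p.1 ≤ 122)) = true := h
      constructor
      · simp only [List.foldl_cons, h', if_pos, Bool.not_false]
        rw [(ih (acc ++ [555])).2]
        simp [token_string_alt, h]
      · simp only [List.foldl_cons, h', if_pos, Bool.not_true, Bool.false_eq_true, if_false]
        rw [(ih acc).2]
        simp [List.dropWhile, h]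
    · have h' : ((p.1 ≥ 65 && p.1 ≤ 90) || (p.1 ≥ 97 && p.1 ≤ 122)) = false := by
        simpa [pvIsLetter] using h
      constructor
      · simp only [List.foldl_cons, h', Bool.false_eq_true, if_false]
        rw [(ih (acc ++ [p.1])).1]
        simp [token_string_alt, h]
      · simp only [List.foldl_cons, h', Bool.false_eq_true, if_false]
        rw [(ih (acc ++ [p.1])).1]
        simp [List.dropWhile, h, token_string_alt]

-- ===== VERDICT (by name: the statement is the Claim_ definition above) =====
theorem token_string_spec : Claim_equal_token_string := by
  intro array _
  unfold Spec_token_string token_string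
  simpa using (token_string_loop array []).1
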